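-- pv_equiv track=rewrite | github.com/syeongkim/Algorithm | 프로그래머스/2/42626. 더 맵게/더 맵게.py | solution
-- ===== SOURCE A (Python) =====
-- import heapq
--
-- def solution(scoville, K):
--     answer = 0
--     heapq.heapify(scoville)
--
--     while True:
--         if len(scoville) < 2:
--             break
--         if scoville[0] >= K:
--             return answer
--         minScoville = heapq.heappop(scoville)
--         secondMinScoville = heapq.heappop(scoville)
--         heapq.heappush(scoville, minScoville + secondMinScoville * 2)
--         answer += 1
--
--     if len(scoville) < 2:
--         if scoville[0] < K:
--             return -1
--
--     return answer
-- ===== SOURCE B (Python) =====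
-- def _take(base, i, extra):
--     # pop the overall smallest of base[i:] and extra; returns (value, new_i), may pop from extra
--     if i < len(base) and (not extra or base[i] <= extra[0]):
--         return base[i], i + 1
--     return extra.pop(0), i
--
-- def _put(extra, v):
--     # insert v into the sorted buffer extra, after any equal elements
--     j = 0
--     while j < len(extra) and extra[j] <= v:
--         j += 1
--     extra.insert(j, v)
--
-- def solution(scoville, K):
--     # two-stream scheme: an immutable sorted base consumed left-to-right by an index,
--     # plus a small sorted side-buffer holding only the mixed values
--     base = sorted(scoville)
--     extra = []
--     i = 0
--     answer = 0
--     while (len(base) - i) + len(extra) >= 2: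
--         peek = base[i] if i < len(base) and (not extra or base[i] <= extra[0]) else extra[0]
--         if peek >= K:
--             return answer
--         a, i = _take(base, i, extra)
--         b, i = _take(base, i, extra)
--         _put(extra, a + 2 * b)
--         answer += 1
--     peek = base[i] if i < len(base) and (not extra or base[i] <= extra[0]) else extra[0]
--     return answer if peek >= K else -1
-- ===== Notes on version B (the rewrite author's own statement) =====
-- stated objective: alternative
-- what changed: Replaces the single mutable binary heap with a two-stream scheme: the input is sorted once into an immutable base array consumed left-to-right by an index pointer, while mixed values live in a separate small sorted side-buffer; each step merges the heads of the two streams instead of sifting through one heap, and B reads a sorted copy instead of heapifying the argument in place.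
-- outside the precondition, e.g. on solution([], 5): A raises IndexError, B raises IndexError
import Mathlib
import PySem

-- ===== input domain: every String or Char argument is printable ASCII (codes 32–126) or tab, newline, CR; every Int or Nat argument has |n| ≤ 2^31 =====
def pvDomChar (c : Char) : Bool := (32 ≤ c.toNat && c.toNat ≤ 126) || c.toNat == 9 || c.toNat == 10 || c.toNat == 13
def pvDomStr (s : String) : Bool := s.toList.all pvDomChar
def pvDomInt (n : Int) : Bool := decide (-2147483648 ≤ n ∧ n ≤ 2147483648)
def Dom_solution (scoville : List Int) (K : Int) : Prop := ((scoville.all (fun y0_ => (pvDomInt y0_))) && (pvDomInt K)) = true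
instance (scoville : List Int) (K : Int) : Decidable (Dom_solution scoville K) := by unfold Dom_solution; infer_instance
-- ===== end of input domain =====

-- B replaces A's in-place binary heap with a sorted base stream consumed by a pointer plus a
-- separate sorted side-buffer for mixed values (alternative); return-value equivalence only:
-- A heapifies its argument in place, B reads a sorted copy.

-- ===== PORT A =====
-- heapq is ported as a heap-ordered tree. CPython's array heap and this tree hold the same
-- multiset at every step and heappop returns its minimum VALUE in both, so every value A reads
-- from the heap (scoville[0], both pops) is computed exactly.
inductive PyHeap : Type where
  | nil : PyHeap
  | node : Int → PyHeap → PyHeap → PyHeap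
deriving DecidableEq, Repr

def PyHeap.size : PyHeap → Nat
  | .nil => 0
  | .node _ l r => 1 + l.size + r.size

-- heapq.heappush: sift the new element down a root path, swapping children to stay balanced
def PyHeap.push (x : Int) : PyHeap → PyHeap
  | .nil => .node x .nil .nil
  | .node y l r => if x ≤ y then .node x (PyHeap.push y r) l else .node y (PyHeap.push x r) l

-- combine the two subtrees left after removing the root
def PyHeap.meld : PyHeap → PyHeap → PyHeap
  | .nil, r => r
  | .node a la ra, r => PyHeap.push a (PyHeap.meld la (PyHeap.meld ra r))

-- scoville[0] on the heap; the nil case is unreachable wherever A does not raise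
def PyHeap.top : PyHeap → Int
  | .nil => 0
  | .node v _ _ => v

-- heapq.heappop : (popped minimum, remaining heap); the nil case is unreachable under Pre_
def PyHeap.pop : PyHeap → Int × PyHeap
  | .nil => (0, .nil)
  | .node v l r => (v, PyHeap.meld l r)

-- heapq.heapify
def pyHeapify (xs : List Int) : PyHeap := xs.foldl (fun h x => h.push x) .nil

-- the while-loop of A, with the post-loop tail (break only happens when len < 2); the fuel is
-- only a totalization guard: each combining step shrinks the heap by one, so an initial fuel of
-- len(scoville) is never exhausted before the loop's own exit tests fire
def heapLoop (K : Int) : Nat → PyHeap → Int → Int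
  | 0, h, ans => if h.top < K then -1 else ans
  | f + 1, h, ans =>
      if h.size < 2 then
        (if h.top < K then -1 else ans)
      else if h.top ≥ K then ans
      else
        let p1 := h.pop
        let p2 := p1.2.pop
        heapLoop K f (PyHeap.push (p1.1 + p2.1 * 2) p2.2) (ans + 1)

def solution (scoville : List Int) (K : Int) : Int :=
  heapLoop K scoville.length (pyHeapify scoville) 0

-- ===== PORT B =====
-- _take from Source B: pop the overall smallest of the base suffix and the buffer; the base
-- suffix base[i:] is represented directly as the list bs, advancing i = dropping the head.
-- The ([],[]) case is unreachable wherever the Python runs _take (total count ≥ 2 there).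
def takeB (bs es : List Int) : Int × List Int × List Int :=
  match bs, es with
  | b :: bt, [] => (b, bt, [])
  | b :: bt, e :: et => if b ≤ e then (b, bt, e :: et) else (e, b :: bt, et)
  | [], e :: et => (e, [], et)
  | [], [] => (0, [], [])

-- _put from Source B: insert v into the sorted buffer after any equal elements
def putB (v : Int) : List Int → List Int
  | [] => [v]
  | e :: et => if e ≤ v then e :: putB v et else v :: e :: et

-- the 'peek' expression of Source B; the ([],[]) case is Python's IndexError (outside Pre_)
def peekB (bs es : List Int) : Int :=
  match bs, es with
  | b :: _, [] => b
  | b :: _, e :: _ => if b ≤ e then b else e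
  | [], e :: _ => e
  | [], [] => 0

-- B's while-loop followed by the final return expression; the fuel is only a totalization
-- guard (each combining step shrinks the total count by one), never exhausted before the
-- loop's own exit test fires on a nonempty input
def twoLoop (K : Int) : Nat → List Int → List Int → Int → Int
  | 0, bs, es, ans => if peekB bs es ≥ K then ans else -1
  | f + 1, bs, es, ans =>
      if bs.length + es.length < 2 then (if peekB bs es ≥ K then ans else -1)
      else if peekB bs es ≥ K then ans
      else
        let t1 := takeB bs es
        let t2 := takeB t1.2.1 t1.2.2
        twoLoop K f t2.2.1 (putB (t1.1 + 2 * t2.1) t2.2.2) (ans + 1)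

def solution_alt (scoville : List Int) (K : Int) : Int :=
  twoLoop K scoville.length (PySem.List.sorted scoville (fun x => x) false) [] 0

-- ===== PRECONDITION & SPEC =====
-- Pre_ excludes only the empty list, on which A raises IndexError at scoville[0].
def Pre_solution (scoville : List Int) (K : Int) : Prop := scoville ≠ []
instance (scoville : List Int) (K : Int) : Decidable (Pre_solution scoville K) := by
  unfold Pre_solution; infer_instance

def pvWitness_solution : List Int × Int := ([1, 2, 3, 9, 10, 12], 7)

def Spec_solution (scoville : List Int) (K : Int) (out : Int) : Prop := out = solution_alt scoville K
instance (scoville : List Int) (K : Int) (out : Int) : Decidable (Spec_solution scoville K out) := by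
  unfold Spec_solution; infer_instance

-- ===== CLAIM (what is proved, stated in full; the proofs are below) =====
def Claim_equal_solution : Prop := ∀ (scoville : List Int) (K : Int), Dom_solution scoville K → Pre_solution scoville K → Spec_solution scoville K (solution scoville K)

-- ===== LEMMAS AND PROOFS =====

-- ---- heap side: the heap holds a multiset, pop returns its minimum ----
def PyHeap.toMS : PyHeap → Multiset Int
  | .nil => 0
  | .node v l r => v ::ₘ (l.toMS + r.toMS)

def HOrd : PyHeap → Prop
  | .nil => True
  | .node v l r => (∀ x ∈ l.toMS, v ≤ x) ∧ (∀ x ∈ r.toMS, v ≤ x) ∧ HOrd l ∧ HOrd r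

theorem toMS_push (h : PyHeap) : ∀ x : Int, (h.push x).toMS = x ::ₘ h.toMS := by
  induction h with
  | nil => intro x; simp [PyHeap.push, PyHeap.toMS]
  | node y l r ihl ihr =>
      intro x
      simp only [PyHeap.push]
      split
      · simp only [PyHeap.toMS, ihr]
        simp only [← Multiset.singleton_add]
        abel
      · simp only [PyHeap.toMS, ihr]
        simp only [← Multiset.singleton_add]
        abel

theorem HOrd_push (h : PyHeap) : ∀ x : Int, HOrd h → HOrd (h.push x) := by
  induction h with
  | nil => intro x _; exact ⟨by simp [PyHeap.toMS], by simp [PyHeap.toMS], trivial, trivial⟩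
  | node y l r ihl ihr =>
      intro x hh
      simp only [PyHeap.push]
      split
      · rename_i hxy
        refine ⟨?_, ?_, ihr y hh.2.2.2, hh.2.2.1⟩
        · intro z hz
          rw [toMS_push] at hz
          rcases Multiset.mem_cons.mp hz with rfl | hz
          · exact hxy
          · exact le_trans hxy (hh.2.1 z hz)
        · intro z hz
          exact le_trans hxy (hh.1 z hz)
      · rename_i hxy
        push_neg at hxy
        refine ⟨?_, hh.1, ihr x hh.2.2.2, hh.2.2.1⟩
        · intro z hz
          rw [toMS_push] at hz
          rcases Multiset.mem_cons.mp hz with rfl | hz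
          · exact le_of_lt hxy
          · exact hh.2.1 z hz

theorem toMS_meld (a : PyHeap) : ∀ b : PyHeap, (PyHeap.meld a b).toMS = a.toMS + b.toMS := by
  induction a with
  | nil => intro b; simp [PyHeap.meld, PyHeap.toMS]
  | node v la ra ihl ihr =>
      intro b
      simp only [PyHeap.meld, toMS_push, ihl, ihr, PyHeap.toMS]
      simp only [← Multiset.singleton_add]
      abel

theorem HOrd_meld (a : PyHeap) : ∀ b : PyHeap, HOrd a → HOrd b → HOrd (PyHeap.meld a b) := by
  induction a with
  | nil => intro b _ hb; exact hb
  | node v la ra ihl ihr =>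
      intro b ha hb
      exact HOrd_push _ v (ihl _ ha.2.2.1 (ihr b ha.2.2.2 hb))

theorem top_le (v : Int) (l r : PyHeap) (h : HOrd (.node v l r)) :
    ∀ x ∈ (PyHeap.node v l r).toMS, v ≤ x := by
  intro x hx
  simp only [PyHeap.toMS, Multiset.mem_cons, Multiset.mem_add] at hx
  rcases hx with rfl | hx | hx
  · exact le_refl x
  · exact h.1 x hx
  · exact h.2.1 x hx

theorem size_eq_card (h : PyHeap) : h.size = Multiset.card h.toMS := by
  induction h with
  | nil => rfl
  | node v l r ihl ihr => simp [PyHeap.size, PyHeap.toMS, ihl, ihr]; omega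

theorem heapify_spec (xs : List Int) :
    HOrd (pyHeapify xs) ∧ (pyHeapify xs).toMS = ↑xs := by
  suffices h : ∀ (l : List Int) (h0 : PyHeap), HOrd h0 →
      HOrd (l.foldl (fun h x => h.push x) h0) ∧
      (l.foldl (fun h x => h.push x) h0).toMS = h0.toMS + ↑l by
    have := h xs .nil trivial
    simpa [pyHeapify, PyHeap.toMS] using this
  intro l
  induction l with
  | nil => intro h0 hh; exact ⟨hh, by simp⟩
  | cons x t ih =>
      intro h0 hh
      have := ih (h0.push x) (HOrd_push h0 x hh)
      rw [List.foldl_cons]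
      refine ⟨this.1, ?_⟩
      rw [this.2, toMS_push]
      rw [show ((x :: t : List Int) : Multiset Int) = x ::ₘ (↑t : Multiset Int) from rfl]
      simp only [← Multiset.singleton_add]
      abel

-- the minimum: a heap whose multiset is a sorted nonempty list has that list's head on top,
-- and popping it leaves the tail's multiset
theorem top_pop_spec (h : PyHeap) (a : Int) (t : List Int)
    (hh : HOrd h) (hms : h.toMS = ↑(a :: t)) (hmin : ∀ x ∈ (a :: t), a ≤ x) :
    h.top = a ∧ (h.pop).2.toMS = ↑t := by
  cases h with
  | nil => simp [PyHeap.toMS] at hms; exact absurd hms.symm (by simp)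
  | node v l r =>
      have hv : v = a := by
        have hvmem : v ∈ (PyHeap.node v l r).toMS := by simp [PyHeap.toMS]
        rw [hms] at hvmem
        have h1 : a ≤ v := hmin v (by simpa using hvmem)
        have hamem : a ∈ (PyHeap.node v l r).toMS := by rw [hms]; simp
        have h2 : v ≤ a := top_le v l r hh a hamem
        omega
      subst hv
      refine ⟨rfl, ?_⟩
      simp only [PyHeap.pop, toMS_meld]
      have : v ::ₘ (l.toMS + r.toMS) = v ::ₘ (↑t : Multiset Int) := by
        simpa [PyHeap.toMS] using hms
      exact (Multiset.cons_inj_right v).mp this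

theorem HOrd_pop (h : PyHeap) (hh : HOrd h) : HOrd (h.pop).2 := by
  cases h with
  | nil => trivial
  | node v l r => exact HOrd_meld l r hh.2.2.1 hh.2.2.2

-- ---- the sorted buffer insertion putB ----
theorem putB_perm (x : Int) (s : List Int) : (putB x s).Perm (x :: s) := by
  induction s with
  | nil => simp [putB]
  | cons y ys ih =>
      simp only [putB]
      split
      · exact (List.Perm.cons y ih).trans (List.Perm.swap x y ys)
      · exact List.Perm.refl _

theorem putB_length (x : Int) (s : List Int) : (putB x s).length = s.length + 1 :=
  (putB_perm x s).length_eq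

theorem putB_coe (x : Int) (s : List Int) :
    ((putB x s : List Int) : Multiset Int) = x ::ₘ ↑s :=
  Multiset.coe_eq_coe.mpr (putB_perm x s)

theorem putB_pairwise (x : Int) (s : List Int) (hs : s.Pairwise (· ≤ ·)) :
    (putB x s).Pairwise (· ≤ ·) := by
  induction s with
  | nil => simp [putB]
  | cons y ys ih =>
      simp only [putB]
      rcases List.pairwise_cons.mp hs with ⟨hy, hys⟩
      split
      · rename_i hyx
        refine List.pairwise_cons.mpr ⟨?_, ih hys⟩
        intro b hb
        rcases List.mem_cons.mp ((putB_perm x ys).mem_iff.mp hb) with h1 | h1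
        · subst h1; omega
        · exact hy _ h1
      · rename_i hyx
        push_neg at hyx
        refine List.pairwise_cons.mpr ⟨?_, hs⟩
        intro b hb
        rcases hb with _ | hb
        · omega
        · exact le_trans (le_of_lt hyx) (hy _ (by assumption))

theorem head_min (a : Int) (t : List Int) (hs : (a :: t).Pairwise (· ≤ ·)) :
    ∀ x ∈ (a :: t), a ≤ x := by
  intro x hx
  rcases hx with _ | hx
  · omega
  · exact (List.pairwise_cons.mp hs).1 _ (by assumption)

-- ---- reference single-sorted-list loop, the bridge between the heap and the two streams ----
def pyFinal (K : Int) (s : List Int) (ans : Int) : Int :=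
  match s with
  | x :: _ => if x ≥ K then ans else -1
  | [] => -1

def listLoop (K : Int) : Nat → List Int → Int → Int
  | 0, s, ans => pyFinal K s ans
  | f + 1, a :: b :: rest, ans =>
      if a < K then listLoop K f (putB (a + 2 * b) rest) (ans + 1)
      else pyFinal K (a :: b :: rest) ans
  | _ + 1, s, ans => pyFinal K s ans

-- heap loop = sorted-list loop, by induction on the common fuel
theorem loop_eq (f : Nat) : ∀ (h : PyHeap) (s : List Int) (ans K : Int),
    s.length = f → s ≠ [] → HOrd h → s.Pairwise (· ≤ ·) → h.toMS = ↑s →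
    heapLoop K f h ans = listLoop K f s ans := by
  induction f with
  | zero =>
      intro h s ans K hlen hne _ _ _
      exact absurd (List.length_eq_zero_iff.mp hlen) hne
  | succ n ih =>
    intro h s ans K hlen hne hh hsort hms
    have hcard : h.size = s.length := by rw [size_eq_card, hms]; simp
    match s, hne with
    | [a], _ =>
        have htp := top_pop_spec h a [] hh (by simpa using hms) (head_min a [] hsort)
        simp only [heapLoop, listLoop, pyFinal]
        have : h.size < 2 := by rw [hcard]; simp
        rw [if_pos this, htp.1]
        split_ifs <;> omega
    | a :: b :: rest, _ =>
        have hmin := head_min a (b :: rest) hsort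
        have htp := top_pop_spec h a (b :: rest) hh hms hmin
        simp only [heapLoop]
        have hsz : ¬ h.size < 2 := by rw [hcard]; simp only [List.length_cons]; omega
        rw [if_neg hsz, htp.1]
        by_cases hK : a ≥ K
        · rw [if_pos hK]
          simp only [listLoop, pyFinal]
          split_ifs <;> first | rfl | omega
        · rw [if_neg hK]
          simp only [listLoop]
          rw [if_pos (by omega)]
          have hh1 : HOrd (h.pop).2 := HOrd_pop h hh
          have hsort1 : (b :: rest).Pairwise (· ≤ ·) := List.pairwise_cons.mp hsort |>.2
          have htp2 := top_pop_spec (h.pop).2 b rest hh1 htp.2 (head_min b rest hsort1)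
          have hpop1 : (h.pop).1 = a := by
            cases h with
            | nil => simp [PyHeap.toMS] at hms; exact absurd hms.symm (by simp)
            | node v l r => simpa [PyHeap.pop, PyHeap.top] using htp.1
          have hpop2 : ((h.pop).2.pop).1 = b := by
            have h2 := htp2.1
            cases hp : (h.pop).2 with
            | nil =>
                exfalso
                have h3 := htp.2
                rw [hp] at h3
                simp only [PyHeap.toMS] at h3
                exact (by simp : ((b :: rest : List Int) : Multiset Int) ≠ 0) h3.symm
            | node v l r =>
                rw [hp] at h2
                simpa [PyHeap.pop, PyHeap.top] using h2
          rw [hpop1, hpop2]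
          have harith : a + b * 2 = a + 2 * b := by ring
          rw [harith]
          apply ih
          · rw [putB_length]; simp at hlen; omega
          · intro e
            have := putB_length (a + 2 * b) rest
            rw [e] at this; simp at this
          · exact HOrd_push _ _ (HOrd_pop _ hh1)
          · exact putB_pairwise _ _ (List.pairwise_cons.mp hsort1).2
          · rw [toMS_push, putB_coe, htp2.2]

-- ---- merging the two streams into the single sorted list they represent ----
def mergeBE : List Int → List Int → List Int
  | bs, [] => bs
  | [], es => es
  | b :: bt, e :: et => if b ≤ e then b :: mergeBE bt (e :: et) else e :: mergeBE (b :: bt) et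

theorem mergeBE_nil_right (bs : List Int) : mergeBE bs [] = bs := by
  cases bs <;> simp [mergeBE]

theorem mergeBE_nil_left (es : List Int) : mergeBE [] es = es := by
  cases es <;> simp [mergeBE]

theorem mergeBE_perm (bs : List Int) : ∀ es : List Int, (mergeBE bs es).Perm (bs ++ es) := by
  induction bs with
  | nil => intro es; cases es <;> simp [mergeBE]
  | cons b bt ih =>
      intro es
      induction es with
      | nil => simp [mergeBE]
      | cons e et ihe =>
          simp only [mergeBE]
          split
          · exact List.Perm.cons b (ih (e :: et))
          · refine (List.Perm.cons e ihe).trans ?_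
            refine (List.Perm.cons e (List.Perm.refl _)).trans ?_
            have := List.perm_middle (a := e) (l₁ := b :: bt) (l₂ := et)
            simpa using this.symm

theorem mergeBE_length (bs es : List Int) :
    (mergeBE bs es).length = bs.length + es.length := by
  have := (mergeBE_perm bs es).length_eq
  simpa using this

theorem mergeBE_pairwise (bs : List Int) : ∀ es : List Int,
    bs.Pairwise (· ≤ ·) → es.Pairwise (· ≤ ·) → (mergeBE bs es).Pairwise (· ≤ ·) := by
  induction bs with
  | nil =>
      intro es _ he
      cases es with
      | nil => simp [mergeBE]
      | cons h t => simpa [mergeBE] using he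
  | cons b bt ih =>
      intro es hb he
      induction es with
      | nil => simpa [mergeBE] using hb
      | cons e et ihe =>
          simp only [mergeBE]
          rcases List.pairwise_cons.mp hb with ⟨hbmin, hbt⟩
          rcases List.pairwise_cons.mp he with ⟨hemin, het⟩
          split
          · rename_i hbe
            refine List.pairwise_cons.mpr ⟨?_, ih (e :: et) hbt he⟩
            intro x hx
            rcases (List.mem_append.mp ((mergeBE_perm bt (e :: et)).mem_iff.mp hx)) with h1 | h1
            · exact hbmin _ h1
            · rcases h1 with _ | h1
              · exact hbe
              · exact le_trans hbe (hemin _ (by assumption))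
          · rename_i hbe
            push_neg at hbe
            refine List.pairwise_cons.mpr ⟨?_, ihe het⟩
            intro x hx
            rcases (List.mem_append.mp ((mergeBE_perm (b :: bt) et).mem_iff.mp hx)) with h1 | h1
            · rcases h1 with _ | h1
              · omega
              · exact le_trans (le_of_lt hbe) (hbmin _ (by assumption))
            · exact hemin _ h1

-- one merge step is exactly (peekB, takeB)
theorem mergeBE_step (bs es : List Int) (hne : ¬ (bs = [] ∧ es = [])) :
    mergeBE bs es =
      peekB bs es :: mergeBE (takeB bs es).2.1 (takeB bs es).2.2 ∧
    (takeB bs es).1 = peekB bs es := by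
  match bs, es with
  | [], [] => exact absurd ⟨rfl, rfl⟩ hne
  | b :: bt, [] => exact ⟨by simp [mergeBE, takeB, peekB], rfl⟩
  | [], e :: et => exact ⟨by simp [mergeBE, takeB, peekB, mergeBE_nil_left], rfl⟩
  | b :: bt, e :: et =>
      by_cases hbe : b ≤ e
      · exact ⟨by simp [mergeBE, takeB, peekB, hbe], by simp [takeB, peekB, hbe]⟩
      · exact ⟨by simp [mergeBE, takeB, peekB, hbe], by simp [takeB, peekB, hbe]⟩

-- inserting a mixed value into the buffer commutes with merging: both sides are sorted
-- lists carrying the same multiset, hence equal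
theorem mergeBE_putB (v : Int) (bs es : List Int)
    (hb : bs.Pairwise (· ≤ ·)) (he : es.Pairwise (· ≤ ·)) :
    mergeBE bs (putB v es) = putB v (mergeBE bs es) := by
  have hperm : (mergeBE bs (putB v es)).Perm (putB v (mergeBE bs es)) :=
    (mergeBE_perm bs (putB v es)).trans
      ((List.Perm.append_left bs (putB_perm v es)).trans
        (List.perm_middle.trans
          ((List.Perm.cons v (mergeBE_perm bs es).symm).trans (putB_perm v _).symm)))
  exact List.Perm.eq_of_pairwise (fun a b _ _ h1 h2 => le_antisymm h1 h2)
    (mergeBE_pairwise bs _ hb (putB_pairwise v es he))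
    (putB_pairwise v _ (mergeBE_pairwise bs es hb he)) hperm

-- B's two-stream loop computes the same as the single sorted-list loop on the merged list
theorem two_eq_list (K : Int) (f : Nat) : ∀ (bs es : List Int) (ans : Int),
    bs.Pairwise (· ≤ ·) → es.Pairwise (· ≤ ·) → ¬ (bs = [] ∧ es = []) →
    twoLoop K f bs es ans = listLoop K f (mergeBE bs es) ans := by
  induction f with
  | zero =>
      intro bs es ans hb he hne
      have hstep := mergeBE_step bs es hne
      simp only [twoLoop, listLoop]
      rw [hstep.1]
      simp only [pyFinal]
  | succ n ih =>
      intro bs es ans hb he hne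
      have hstep := mergeBE_step bs es hne
      simp only [twoLoop]
      by_cases hlen : bs.length + es.length < 2
      · rw [if_pos hlen, hstep.1]
        -- merged list has exactly one element
        have h1 : (mergeBE (takeB bs es).2.1 (takeB bs es).2.2).length = 0 := by
          have := mergeBE_length bs es
          rw [hstep.1] at this
          simp at this; omega
        rw [List.length_eq_zero_iff.mp h1]
        simp only [listLoop, pyFinal]
      · rw [if_neg hlen]
        -- merged list has ≥ 2 elements: peel two heads
        obtain ⟨hm1, hv1⟩ := hstep
        have hne1 : ¬ ((takeB bs es).2.1 = [] ∧ (takeB bs es).2.2 = []) := by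
          rintro ⟨e1, e2⟩
          have := mergeBE_length bs es
          rw [hm1, e1, e2] at this
          simp [mergeBE] at this; omega
        obtain ⟨hm2, hv2⟩ := mergeBE_step (takeB bs es).2.1 (takeB bs es).2.2 hne1
        by_cases hK : peekB bs es ≥ K
        · rw [if_pos hK, hm1, hm2]
          simp only [listLoop, pyFinal]
          split_ifs <;> first | rfl | omega
        · rw [if_neg hK, hm1, hm2]
          simp only [listLoop]
          rw [if_pos (by omega)]
          -- sortedness carried to the remaining streams
          have hb1 : (takeB bs es).2.1.Pairwise (· ≤ ·) := by
            match bs, es with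
            | b :: bt, [] => exact (List.pairwise_cons.mp hb).2
            | b :: bt, e :: et =>
                simp only [takeB]; split
                · exact (List.pairwise_cons.mp hb).2
                · exact hb
            | [], e :: et => exact List.Pairwise.nil
          have he1 : (takeB bs es).2.2.Pairwise (· ≤ ·) := by
            match bs, es with
            | b :: bt, [] => exact List.Pairwise.nil
            | b :: bt, e :: et =>
                simp only [takeB]; split
                · exact he
                · exact (List.pairwise_cons.mp he).2
            | [], e :: et => exact (List.pairwise_cons.mp he).2
          have hb2 : (takeB (takeB bs es).2.1 (takeB bs es).2.2).2.1.Pairwise (· ≤ ·) := by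
            match h1 : (takeB bs es).2.1, h2 : (takeB bs es).2.2 with
            | b :: bt, [] => rw [h1] at hb1; exact (List.pairwise_cons.mp hb1).2
            | b :: bt, e :: et =>
                rw [h1] at hb1
                simp only [takeB]; split
                · exact (List.pairwise_cons.mp hb1).2
                · exact hb1
            | [], e :: et => exact List.Pairwise.nil
            | [], [] => exact List.Pairwise.nil
          have he2 : (takeB (takeB bs es).2.1 (takeB bs es).2.2).2.2.Pairwise (· ≤ ·) := by
            match h1 : (takeB bs es).2.1, h2 : (takeB bs es).2.2 with
            | b :: bt, [] => exact List.Pairwise.nil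
            | b :: bt, e :: et =>
                rw [h2] at he1
                simp only [takeB]; split
                · exact he1
                · exact (List.pairwise_cons.mp he1).2
            | [], e :: et => rw [h2] at he1; exact (List.pairwise_cons.mp he1).2
            | [], [] => exact List.Pairwise.nil
          rw [ih _ _ _ hb2 (putB_pairwise _ _ he2) (by
            rintro ⟨e1, e2⟩
            have := putB_length ((takeB bs es).1 + 2 * (takeB (takeB bs es).2.1 (takeB bs es).2.2).1) (takeB (takeB bs es).2.1 (takeB bs es).2.2).2.2
            rw [e2] at this; simp at this)]
          rw [mergeBE_putB _ _ _ hb2 he2, hv1, hv2]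

theorem solution_eq (scoville : List Int) (K : Int) (hne : scoville ≠ []) :
    solution scoville K = solution_alt scoville K := by
  unfold solution solution_alt
  set s := PySem.List.sorted scoville (fun x => x) false with hs
  have hperm : s.Perm scoville := PySem.List.sorted_perm scoville (fun x => x) false
  have hp : s.Pairwise (· ≤ ·) := by
    have := PySem.List.sorted_pairwise (xs := scoville) (key := fun x => x)
    simpa using this
  have hsne : s ≠ [] := by
    intro e
    exact hne (List.Perm.nil_eq (e ▸ hperm)).symm
  have hlen : s.length = scoville.length := hperm.length_eq
  have hspec := heapify_spec scoville
  rw [two_eq_list K scoville.length s [] 0 hp List.Pairwise.nil (by rintro ⟨e1, _⟩; exact hsne e1)]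
  rw [mergeBE_nil_right]
  rw [← hlen]
  apply loop_eq s.length _ _ _ _ rfl hsne hspec.1 hp
  rw [hspec.2]
  exact (Multiset.coe_eq_coe.mpr hperm).symm

-- ===== VERDICT (by name: the statement is the Claim_ definition above) =====
theorem solution_spec : Claim_equal_solution := by
  intro scoville K _ hpre
  unfold Spec_solution
  exact solution_eq scoville K hpre
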